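-- pv_equiv track=rewrite | github.com/storm-crypto/kaoyan-2027-coach | scripts/latex_to_unicode.py | _consume_delimiter
-- ===== SOURCE A (Python) =====
-- from typing import List, Match, Tuple
--
-- _DELIMITER_COMMANDS = {
--     r"\{": "{",
--     r"\}": "}",
--     r"\langle": "\u27e8",
--     r"\rangle": "\u27e9",
--     r"\lvert": "|",
--     r"\rvert": "|",
--     r"\lfloor": "\u230a",
--     r"\rfloor": "\u230b",
--     r"\lceil": "\u2308",
--     r"\rceil": "\u2309",
-- }
--
-- def _skip_spaces(text: str, start: int) -> int:
--     index = start
--     while index < len(text) and text[index].isspace():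
--         index += 1
--     return index
--
-- def _consume_delimiter(text: str, start: int) -> Tuple[str, int]:
--     index = _skip_spaces(text, start)
--     if index >= len(text):
--         return "", index
--
--     for token, value in sorted(_DELIMITER_COMMANDS.items(), key=lambda item: len(item[0]), reverse=True):
--         if text.startswith(token, index):
--             return value, index + len(token)
--
--     char = text[index]
--     if char in "()[]|":
--         return char, index + 1
--     if char == ".":
--         return "", index + 1
--     return "", index
-- ===== SOURCE B (Python) =====
-- from typing import Tuple
--
-- # Hand-compiled decision tree (trie): dispatch on the first, second and third
-- # character instead of scanning a list of candidate tokens.  After '\', the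
-- # second char decides between '{', '}' and an 'l'/'r' command; the third char
-- # uniquely selects the command word (their first letters a/f/v/c are distinct),
-- # which is then confirmed with a single startswith.
-- _WORDS = {
--     "a": ("angle", "\u27e8", "\u27e9"),
--     "f": ("floor", "\u230a", "\u230b"),
--     "v": ("vert", "|", "|"),
--     "c": ("ceil", "\u2308", "\u2309"),
-- }
--
-- _SINGLE_CHARS = {"(": "(", ")": ")", "[": "[", "]": "]", "|": "|", ".": ""}
--
--
-- def _skip_spaces(text: str, start: int) -> int:
--     index = start
--     while index < len(text) and text[index].isspace():
--         index += 1
--     return index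
--
--
-- def _consume_delimiter(text: str, start: int) -> Tuple[str, int]:
--     index = _skip_spaces(text, start)
--     n = len(text)
--     if index >= n:
--         return "", index
--     c = text[index]
--     if c == "\\" and index + 1 < n:
--         d = text[index + 1]
--         if d == "{":
--             return "{", index + 2
--         if d == "}":
--             return "}", index + 2
--         if d in ("l", "r") and index + 2 < n:
--             w = _WORDS.get(text[index + 2])
--             if w is not None:
--                 word, lval, rval = w
--                 if text.startswith(word, index + 2):
--                     return (lval if d == "l" else rval), index + 2 + len(word)
--         return "", index
--     value = _SINGLE_CHARS.get(c)
--     if value is not None: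
--         return value, index + 1
--     return "", index
-- ===== Notes on version B (the rewrite author's own statement) =====
-- stated objective: alternative
-- what changed: Replaces the linear scan over the ten length-sorted delimiter tokens (one startswith per token) by a hand-compiled decision tree (trie): dispatch on the first character, then the character after the backslash, then the third character which uniquely selects the command word, confirmed by a single startswith.
-- outside the precondition, e.g. on _consume_delimiter('{\\', -1): A returns ('', -1), B returns ('{', 1)
import Mathlib
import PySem

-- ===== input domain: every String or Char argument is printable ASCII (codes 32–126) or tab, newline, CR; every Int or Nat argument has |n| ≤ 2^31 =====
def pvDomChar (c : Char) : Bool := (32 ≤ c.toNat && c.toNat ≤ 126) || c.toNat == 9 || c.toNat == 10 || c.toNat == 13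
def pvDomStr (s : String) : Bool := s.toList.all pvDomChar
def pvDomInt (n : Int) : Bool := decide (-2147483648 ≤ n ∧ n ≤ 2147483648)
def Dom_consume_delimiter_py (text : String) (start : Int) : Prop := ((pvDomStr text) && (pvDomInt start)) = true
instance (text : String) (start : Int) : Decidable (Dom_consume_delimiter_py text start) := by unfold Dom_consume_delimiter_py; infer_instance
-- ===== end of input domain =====

-- B replaces A's linear scan over the ten length-sorted delimiter tokens by a hand-compiled
-- decision tree (trie): dispatch on the first / second / third character, one word check.
-- Equivalence is proved for nonnegative start (the cursor's natural domain; see Pre_).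

-- ===== PORT A =====

-- _DELIMITER_COMMANDS (dict literal, insertion order)
def pyDelimCommands : PySem.Dict String String :=
  PySem.Dict.ofList
    [("\\{", "{"), ("\\}", "}"), ("\\langle", "⟨"), ("\\rangle", "⟩"),
     ("\\lvert", "|"), ("\\rvert", "|"), ("\\lfloor", "⌊"), ("\\rfloor", "⌋"),
     ("\\lceil", "⌈"), ("\\rceil", "⌉")]

-- _skip_spaces: while index < len(text) and text[index].isspace(): index += 1
-- (fuel = (len - start).toNat bounds the iteration count exactly: the loop only runs while
--  index < len and index only increases; text[index] with index < -len raises IndexError in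
--  Python; that case is outside Pre_, the port returns the current index there)
def pySkipSpacesGo (cs : List Char) (fuel : Nat) (index : Int) : Int :=
  match fuel with
  | 0 => index
  | fuel + 1 =>
    if index < (cs.length : Int) then
      match PySem.List.pyGet? cs index with
      | some c => if PySem.Chars.isspace c then pySkipSpacesGo cs fuel (index + 1) else index
      | none => index
    else index

def py_skip_spaces (text : String) (start : Int) : Int :=
  pySkipSpacesGo text.toList ((text.toList.length : Int) - start).toNat start

-- the for-loop over sorted(_DELIMITER_COMMANDS.items(), key=lambda item: len(item[0]), reverse=True);
-- text.startswith(token, index) is exactly: token is a prefix of the slice text[index:]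
def pyDelimScan (cs : List Char) (index : Int) : List (String × String) → Option (String × Int)
  | [] => none
  | (token, value) :: rest =>
      if PySem.Chars.startswith (PySem.List.slice cs (some index) none) token.toList then
        some (value, index + (token.length : Int))
      else pyDelimScan cs index rest

def consume_delimiter_py (text : String) (start : Int) : String × Int :=
  let cs := text.toList
  let index := py_skip_spaces text start
  if (cs.length : Int) ≤ index then ("", index)
  else
    match pyDelimScan cs index
        (PySem.List.sorted pyDelimCommands.items (fun item => item.1.length) true) with
    | some r => r
    | none =>
      match PySem.List.pyGet? cs index with
      | none => ("", index)   -- unreachable under Pre_ (0 ≤ index < len)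
      | some char =>
        if PySem.Chars.isIn [char] "()[]|".toList then (String.ofList [char], index + 1)
        else if char = '.' then ("", index + 1)
        else ("", index)

-- ===== PORT B =====

-- _WORDS: third character after '\l'/'\r' uniquely selects the command word
def altWords : PySem.Dict Char (String × String × String) :=
  PySem.Dict.ofList
    [('a', ("angle", "⟨", "⟩")), ('f', ("floor", "⌊", "⌋")),
     ('v', ("vert", "|", "|")), ('c', ("ceil", "⌈", "⌉"))]

-- _SINGLE_CHARS
def altSingleChars : PySem.Dict Char String :=
  PySem.Dict.ofList [('(', "("), (')', ")"), ('[', "["), (']', "]"), ('|', "|"), ('.', "")]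

def consume_delimiter_py_alt (text : String) (start : Int) : String × Int :=
  let cs := text.toList
  let index := py_skip_spaces text start
  if (cs.length : Int) ≤ index then ("", index)
  else
    match PySem.List.pyGet? cs index with
    | none => ("", index)   -- unreachable under Pre_ (0 ≤ index < len)
    | some c =>
      if c = '\\' ∧ index + 1 < (cs.length : Int) then
        match PySem.List.pyGet? cs (index + 1) with
        | none => ("", index)   -- unreachable under Pre_
        | some d =>
          if d = '{' then ("{", index + 2)
          else if d = '}' then ("}", index + 2)
          else if (d = 'l' ∨ d = 'r') ∧ index + 2 < (cs.length : Int) then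
            match PySem.List.pyGet? cs (index + 2) with
            | none => ("", index)   -- unreachable under Pre_
            | some e =>
              match altWords.get? e with
              | none => ("", index)
              | some (word, lval, rval) =>
                if PySem.Chars.startswith (PySem.List.slice cs (some (index + 2)) none) word.toList then
                  ((if d = 'l' then lval else rval), index + 2 + (word.length : Int))
                else ("", index)
          else ("", index)
      else
        match altSingleChars.get? c with
        | some value => (value, index + 1)
        | none => ("", index)

-- ===== PRECONDITION & SPEC =====
-- Pre_ restricts to nonnegative start positions, the natural domain of this internal parser
-- cursor: for negative start A either raises IndexError (start < -len(text)) or reads the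
-- text through Python's negative-index/slice wraparound.
def Pre_consume_delimiter_py (text : String) (start : Int) : Prop := 0 ≤ start
instance (text : String) (start : Int) : Decidable (Pre_consume_delimiter_py text start) := by
  unfold Pre_consume_delimiter_py; infer_instance

def pvWitness_consume_delimiter_py : String × Int := (" \\lceil x", 0)

def Spec_consume_delimiter_py (text : String) (start : Int) (out : String × Int) : Prop :=
  out = consume_delimiter_py_alt text start
instance (text : String) (start : Int) (out : String × Int) :
    Decidable (Spec_consume_delimiter_py text start out) := by
  unfold Spec_consume_delimiter_py; infer_instance

-- ===== CLAIM (what is proved, stated in full; the proofs are below) =====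
def Claim_equal_consume_delimiter_py : Prop :=
  ∀ (text : String) (start : Int), Dom_consume_delimiter_py text start →
    Pre_consume_delimiter_py text start →
    Spec_consume_delimiter_py text start (consume_delimiter_py text start)

-- ===== LEMMAS AND PROOFS =====

theorem pySkipSpacesGo_nonneg (cs : List Char) (fuel : Nat) :
    ∀ (index : Int), 0 ≤ index → 0 ≤ pySkipSpacesGo cs fuel index := by
  induction fuel with
  | zero => intro index h; exact h
  | succ fuel ih =>
    intro index h
    rw [pySkipSpacesGo]
    by_cases hlt : index < (cs.length : Int)
    · rw [if_pos hlt]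
      cases hg : PySem.List.pyGet? cs index with
      | none => exact h
      | some c =>
        by_cases hs : PySem.Chars.isspace c = true
        · simp only [hs, if_true]
          exact ih (index + 1) (by omega)
        · simp only [hs]
          exact h
    · rw [if_neg hlt]
      exact h

-- startswith unfolds one character at a time
theorem startswith_nil (d : List Char) : PySem.Chars.startswith d [] = true :=
  (PySem.Chars.startswith_iff d []).mpr (List.nil_prefix)

theorem startswith_cons (c t : Char) (rest ts : List Char) :
    PySem.Chars.startswith (c :: rest) (t :: ts)
      = (decide (t = c) && PySem.Chars.startswith rest ts) := by
  by_cases h : (t :: ts) <+: (c :: rest)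
  · rw [(PySem.Chars.startswith_iff _ _).mpr h]
    rw [List.cons_prefix_cons] at h
    rw [(PySem.Chars.startswith_iff _ _).mpr h.2]
    simp [h.1]
  · have h2 : PySem.Chars.startswith (c :: rest) (t :: ts) = false := by
      cases hb : PySem.Chars.startswith (c :: rest) (t :: ts)
      · rfl
      · exact absurd ((PySem.Chars.startswith_iff _ _).mp hb) h
    rw [h2]
    rw [List.cons_prefix_cons] at h
    by_cases ht : t = c
    · have h3 : ¬ ts <+: rest := fun hp => h ⟨ht, hp⟩
      have h4 : PySem.Chars.startswith rest ts = false := by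
        cases hb : PySem.Chars.startswith rest ts
        · rfl
        · exact absurd ((PySem.Chars.startswith_iff _ _).mp hb) h3
      simp [h4]
    · simp [ht]

theorem dict_get?_char_none {ν : Type} (l : List (Char × ν)) (e : Char)
    (h : ∀ p ∈ l, (p.1 == e) = false) : (PySem.Dict.mk l).get? e = none := by
  induction l with
  | nil => simp [PySem.Dict.get?]
  | cons p l ih =>
    obtain ⟨k, v⟩ := p
    rw [PySem.Dict.get?_mk_cons]
    rw [h (k, v) (by simp)]
    simp only [Bool.false_eq_true, if_false]
    exact ih fun q hq => h q (List.mem_cons_of_mem _ hq)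

theorem altSingleChars_mk : altSingleChars
    = PySem.Dict.mk [('(', "("), (')', ")"), ('[', "["), (']', "]"), ('|', "|"), ('.', "")] := by
  decide

theorem altWords_mk : altWords
    = PySem.Dict.mk [('a', ("angle", "⟨", "⟩")), ('f', ("floor", "⌊", "⌋")),
                     ('v', ("vert", "|", "|")), ('c', ("ceil", "⌈", "⌉"))] := by
  decide

-- the single-character fall-through: A's membership test + '.' test = B's dict lookup
theorem fallback_eq (i : Int) (char : Char) :
    (if PySem.Chars.isIn [char] "()[]|".toList then ((String.ofList [char] : String), i + 1)
     else if char = '.' then (("" : String), i + 1)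
     else ("", i))
      = (match altSingleChars.get? char with
         | some value => (value, i + 1)
         | none => ("", i)) := by
  by_cases h1 : char = '('
  · subst h1
    have hin : PySem.Chars.isIn ['('] "()[]|".toList = true := by decide
    have hget : altSingleChars.get? '(' = some "(" := by decide
    have hstr : (String.ofList ['('] : String) = "(" := by decide
    rw [hin, hget, hstr]; simp
  by_cases h2 : char = ')'
  · subst h2
    have hin : PySem.Chars.isIn [')'] "()[]|".toList = true := by decide
    have hget : altSingleChars.get? ')' = some ")" := by decide
    have hstr : (String.ofList [')'] : String) = ")" := by decide
    rw [hin, hget, hstr]; simp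
  by_cases h3 : char = '['
  · subst h3
    have hin : PySem.Chars.isIn ['['] "()[]|".toList = true := by decide
    have hget : altSingleChars.get? '[' = some "[" := by decide
    have hstr : (String.ofList ['['] : String) = "[" := by decide
    rw [hin, hget, hstr]; simp
  by_cases h4 : char = ']'
  · subst h4
    have hin : PySem.Chars.isIn [']'] "()[]|".toList = true := by decide
    have hget : altSingleChars.get? ']' = some "]" := by decide
    have hstr : (String.ofList [']'] : String) = "]" := by decide
    rw [hin, hget, hstr]; simp
  by_cases h5 : char = '|'
  · subst h5
    have hin : PySem.Chars.isIn ['|'] "()[]|".toList = true := by decide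
    have hget : altSingleChars.get? '|' = some "|" := by decide
    have hstr : (String.ofList ['|'] : String) = "|" := by decide
    rw [hin, hget, hstr]; simp
  by_cases h6 : char = '.'
  · subst h6
    have hin : PySem.Chars.isIn ['.'] "()[]|".toList = false := by decide
    have hget : altSingleChars.get? '.' = some "" := by decide
    rw [hin, hget]; simp
  · have hmem : PySem.Chars.isIn [char] "()[]|".toList = false := by
      apply (PySem.Chars.isIn_eq_false_iff [char] _).mpr
      intro hinf
      have hm : char ∈ "()[]|".toList := hinf.subset (List.mem_singleton_self char)
      have hl : "()[]|".toList = ['(', ')', '[', ']', '|'] := by decide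
      rw [hl] at hm
      simp at hm
      rcases hm with h | h | h | h | h
      · exact h1 h
      · exact h2 h
      · exact h3 h
      · exact h4 h
      · exact h5 h
    have hget : altSingleChars.get? char = none := by
      rw [altSingleChars_mk]
      apply dict_get?_char_none
      intro p hp
      simp only [List.mem_cons, List.not_mem_nil, or_false] at hp
      rcases hp with h | h | h | h | h | h <;> subst h <;>
        exact beq_eq_false_iff_ne.mpr (by intro he; first
          | exact h1 he.symm | exact h2 he.symm | exact h3 he.symm
          | exact h4 he.symm | exact h5 he.symm | exact h6 he.symm)
    rw [hmem, hget]
    simp [h6]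

-- the concrete sorted token list
theorem sorted_tokens_eq :
    PySem.List.sorted pyDelimCommands.items (fun item => item.1.length) true
      = ([("\\langle", "⟨"), ("\\rangle", "⟩"), ("\\lfloor", "⌊"), ("\\rfloor", "⌋"),
          ("\\lvert", "|"), ("\\rvert", "|"), ("\\lceil", "⌈"), ("\\rceil", "⌉"),
          ("\\{", "{"), ("\\}", "}")] : List (String × String)) := by
  decide

-- token / word string literals as char lists and lengths
theorem tok_langle : ("\\langle" : String).toList = ['\\','l','a','n','g','l','e'] := by decide
theorem tok_rangle : ("\\rangle" : String).toList = ['\\','r','a','n','g','l','e'] := by decide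
theorem tok_lfloor : ("\\lfloor" : String).toList = ['\\','l','f','l','o','o','r'] := by decide
theorem tok_rfloor : ("\\rfloor" : String).toList = ['\\','r','f','l','o','o','r'] := by decide
theorem tok_lvert : ("\\lvert" : String).toList = ['\\','l','v','e','r','t'] := by decide
theorem tok_rvert : ("\\rvert" : String).toList = ['\\','r','v','e','r','t'] := by decide
theorem tok_lceil : ("\\lceil" : String).toList = ['\\','l','c','e','i','l'] := by decide
theorem tok_rceil : ("\\rceil" : String).toList = ['\\','r','c','e','i','l'] := by decide
theorem tok_lbrace : ("\\{" : String).toList = ['\\','{'] := by decide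
theorem tok_rbrace : ("\\}" : String).toList = ['\\','}'] := by decide
theorem w_angle : ("angle" : String).toList = ['a','n','g','l','e'] := by decide
theorem w_floor : ("floor" : String).toList = ['f','l','o','o','r'] := by decide
theorem w_vert : ("vert" : String).toList = ['v','e','r','t'] := by decide
theorem w_ceil : ("ceil" : String).toList = ['c','e','i','l'] := by decide
theorem len7a : (("\\langle" : String).length : Int) = 7 := by decide
theorem len7b : (("\\rangle" : String).length : Int) = 7 := by decide
theorem len7c : (("\\lfloor" : String).length : Int) = 7 := by decide
theorem len7d : (("\\rfloor" : String).length : Int) = 7 := by decide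
theorem len6a : (("\\lvert" : String).length : Int) = 6 := by decide
theorem len6b : (("\\rvert" : String).length : Int) = 6 := by decide
theorem len6c : (("\\lceil" : String).length : Int) = 6 := by decide
theorem len6d : (("\\rceil" : String).length : Int) = 6 := by decide
theorem len2a : (("\\{" : String).length : Int) = 2 := by decide
theorem len2b : (("\\}" : String).length : Int) = 2 := by decide
theorem wlen_angle : (("angle" : String).length : Int) = 5 := by decide
theorem wlen_floor : (("floor" : String).length : Int) = 5 := by decide
theorem wlen_vert : (("vert" : String).length : Int) = 4 := by decide
theorem wlen_ceil : (("ceil" : String).length : Int) = 4 := by decide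

theorem startswith_nil_left (t : Char) (ts : List Char) :
    PySem.Chars.startswith [] (t :: ts) = false := by
  cases hb : PySem.Chars.startswith ([] : List Char) (t :: ts)
  · rfl
  · exact absurd ((PySem.Chars.startswith_iff _ _).mp hb) (by simp)

-- everything after the bounds check: A's token scan + fallback = B's decision tree
theorem branch_eq (cs : List Char) (i : Int) (h0 : 0 ≤ i) (hlt : i < (cs.length : Int)) :
    (match pyDelimScan cs i
        (PySem.List.sorted pyDelimCommands.items (fun item => item.1.length) true) with
     | some r => r
     | none =>
       match PySem.List.pyGet? cs i with
       | none => (("" : String), i)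
       | some char =>
         if PySem.Chars.isIn [char] "()[]|".toList then (String.ofList [char], i + 1)
         else if char = '.' then ("", i + 1)
         else ("", i))
    = (match PySem.List.pyGet? cs i with
       | none => (("" : String), i)
       | some c =>
         if c = '\\' ∧ i + 1 < (cs.length : Int) then
           match PySem.List.pyGet? cs (i + 1) with
           | none => ("", i)
           | some d =>
             if d = '{' then ("{", i + 2)
             else if d = '}' then ("}", i + 2)
             else if (d = 'l' ∨ d = 'r') ∧ i + 2 < (cs.length : Int) then
               match PySem.List.pyGet? cs (i + 2) with
               | none => ("", i)
               | some e =>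
                 match altWords.get? e with
                 | none => ("", i)
                 | some (word, lval, rval) =>
                   if PySem.Chars.startswith (PySem.List.slice cs (some (i + 2)) none) word.toList then
                     ((if d = 'l' then lval else rval), i + 2 + (word.length : Int))
                   else ("", i)
             else ("", i)
         else
           match altSingleChars.get? c with
           | some value => (value, i + 1)
           | none => ("", i)) := by
  have hiN : i.toNat < cs.length := by omega
  cases hd : cs.drop i.toNat with
  | nil =>
    exfalso
    have := congrArg List.length hd
    simp [List.length_drop] at this
    omega
  | cons c rest =>
  have hlen0 : cs.length = i.toNat + 1 + rest.length := by
    have := congrArg List.length hd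
    simp [List.length_drop] at this
    omega
  have hgetk : ∀ k : Nat, PySem.List.pyGet? cs (i + (k : Int)) = (cs.drop i.toNat)[k]? := by
    intro k
    rw [PySem.List.pyGet?_of_nonneg cs (by omega)]
    have h1 : (i + (k : Int)).toNat = i.toNat + k := by omega
    rw [h1, List.getElem?_drop]
  have hget0 : PySem.List.pyGet? cs i = some c := by
    have := hgetk 0
    simpa [hd] using this
  have hslice0 : PySem.List.slice cs (some i) none = c :: rest := by
    rw [PySem.List.slice_from cs h0, hd]
  rw [sorted_tokens_eq]
  simp only [hget0]
  by_cases hc : c = '\\'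
  case neg =>
    rw [if_neg (show ¬(c = '\\' ∧ i + 1 < (cs.length : Int)) from fun h => hc h.1)]
    have hc' : ('\\' = c) = False := eq_false (fun h => hc h.symm)
    simp only [pyDelimScan, hslice0, tok_langle, tok_rangle, tok_lfloor, tok_rfloor,
      tok_lvert, tok_rvert, tok_lceil, tok_rceil, tok_lbrace, tok_rbrace,
      startswith_cons, hc', decide_false, Bool.false_and, Bool.false_eq_true, if_false]
    exact fallback_eq i c
  case pos =>
  subst hc
  cases rest with
  | nil =>
    simp only [List.length_nil] at hlen0
    rw [if_neg (show ¬(('\\' : Char) = '\\' ∧ i + 1 < (cs.length : Int)) from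
      fun h => absurd h.2 (by omega))]
    have hg : altSingleChars.get? '\\' = none := by decide
    rw [hg]
    simp [pyDelimScan, hslice0, tok_langle, tok_rangle, tok_lfloor, tok_rfloor,
      tok_lvert, tok_rvert, tok_lceil, tok_rceil, tok_lbrace, tok_rbrace,
      startswith_cons, startswith_nil_left,
      show PySem.Chars.isIn ['\\'] ['(', ')', '[', ']', '|'] = false from by decide]
  | cons d2 rest2 =>
  simp only [List.length_cons] at hlen0
  have hget1 : PySem.List.pyGet? cs (i + 1) = some d2 := by
    have := hgetk 1
    simp only [Nat.cast_one, hd] at this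
    simpa using this
  rw [if_pos (show ('\\' : Char) = '\\' ∧ i + 1 < (cs.length : Int) from ⟨rfl, by omega⟩)]
  simp only [hget1]
  have hslice2 : PySem.List.slice cs (some (i + 2)) none = rest2 := by
    rw [PySem.List.slice_from cs (by omega)]
    have h1 : (i + 2).toNat = i.toNat + 2 := by omega
    have h2 : cs.drop (i.toNat + 2) = (cs.drop i.toNat).drop 2 := by
      rw [List.drop_drop]
    rw [h1, h2, hd]
    rfl
  by_cases hd2a : d2 = '{'
  · subst hd2a
    rw [if_pos rfl]
    simp [pyDelimScan, hslice0, tok_langle, tok_rangle, tok_lfloor, tok_rfloor,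
      tok_lvert, tok_rvert, tok_lceil, tok_rceil, tok_lbrace,
      startswith_cons, startswith_nil, len2a]
  by_cases hd2b : d2 = '}'
  · subst hd2b
    rw [if_neg (by decide), if_pos rfl]
    simp [pyDelimScan, hslice0, tok_langle, tok_rangle, tok_lfloor, tok_rfloor,
      tok_lvert, tok_rvert, tok_lceil, tok_rceil, tok_lbrace, tok_rbrace,
      startswith_cons, startswith_nil, len2b]
  by_cases hd2l : d2 = 'l'
  · subst hd2l
    rw [if_neg (by decide), if_neg (by decide)]
    cases rest2 with
    | nil =>
      simp only [List.length_nil] at hlen0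
      rw [if_neg (show ¬((('l' : Char) = 'l' ∨ ('l' : Char) = 'r') ∧ i + 2 < (cs.length : Int))
        from fun h => absurd h.2 (by omega))]
      simp [pyDelimScan, hslice0, tok_langle, tok_rangle, tok_lfloor, tok_rfloor,
        tok_lvert, tok_rvert, tok_lceil, tok_rceil, tok_lbrace, tok_rbrace,
        startswith_cons, startswith_nil_left]
    | cons e rest3 =>
    simp only [List.length_cons] at hlen0
    have hget2 : PySem.List.pyGet? cs (i + 2) = some e := by
      have := hgetk 2
      simp only [Nat.cast_ofNat, hd] at this
      simpa using this
    rw [if_pos (show (('l' : Char) = 'l' ∨ ('l' : Char) = 'r') ∧ i + 2 < (cs.length : Int)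
      from ⟨Or.inl rfl, by omega⟩)]
    simp only [hget2, hslice2]
    by_cases he1 : e = 'a'
    · subst he1
      rw [show altWords.get? 'a' = some ("angle", "⟨", "⟩") from by decide]
      by_cases hsw : PySem.Chars.startswith rest3 ['n', 'g', 'l', 'e'] = true
      all_goals
        simp [pyDelimScan, hslice0, tok_langle, tok_rangle, tok_lfloor, tok_rfloor,
          tok_lvert, tok_rvert, tok_lceil, tok_rceil, tok_lbrace, tok_rbrace, w_angle,
          startswith_cons, startswith_nil, len7a, wlen_angle, hsw]
      omega
    by_cases he2 : e = 'f'
    · subst he2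
      rw [show altWords.get? 'f' = some ("floor", "⌊", "⌋") from by decide]
      by_cases hsw : PySem.Chars.startswith rest3 ['l', 'o', 'o', 'r'] = true
      all_goals
        simp [pyDelimScan, hslice0, tok_langle, tok_rangle, tok_lfloor, tok_rfloor,
          tok_lvert, tok_rvert, tok_lceil, tok_rceil, tok_lbrace, tok_rbrace, w_floor,
          startswith_cons, startswith_nil, len7c, wlen_floor, hsw]
      omega
    by_cases he3 : e = 'v'
    · subst he3
      rw [show altWords.get? 'v' = some ("vert", "|", "|") from by decide]
      by_cases hsw : PySem.Chars.startswith rest3 ['e', 'r', 't'] = true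
      all_goals
        simp [pyDelimScan, hslice0, tok_langle, tok_rangle, tok_lfloor, tok_rfloor,
          tok_lvert, tok_rvert, tok_lceil, tok_rceil, tok_lbrace, tok_rbrace, w_vert,
          startswith_cons, startswith_nil, len6a, wlen_vert, hsw]
      omega
    by_cases he4 : e = 'c'
    · subst he4
      rw [show altWords.get? 'c' = some ("ceil", "⌈", "⌉") from by decide]
      by_cases hsw : PySem.Chars.startswith rest3 ['e', 'i', 'l'] = true
      all_goals
        simp [pyDelimScan, hslice0, tok_langle, tok_rangle, tok_lfloor, tok_rfloor,
          tok_lvert, tok_rvert, tok_lceil, tok_rceil, tok_lbrace, tok_rbrace, w_ceil,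
          startswith_cons, startswith_nil, len6c, wlen_ceil, hsw]
      omega
    · have hw : altWords.get? e = none := by
        rw [altWords_mk]
        apply dict_get?_char_none
        intro p hp
        simp only [List.mem_cons, List.not_mem_nil, or_false] at hp
        rcases hp with h | h | h | h <;> subst h <;>
          exact beq_eq_false_iff_ne.mpr (by intro hh; first
            | exact he1 hh.symm | exact he2 hh.symm | exact he3 hh.symm | exact he4 hh.symm)
      rw [hw]
      have he1' : ('a' = e) = False := eq_false (fun h => he1 h.symm)
      have he2' : ('f' = e) = False := eq_false (fun h => he2 h.symm)
      have he3' : ('v' = e) = False := eq_false (fun h => he3 h.symm)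
      have he4' : ('c' = e) = False := eq_false (fun h => he4 h.symm)
      simp [pyDelimScan, hslice0, tok_langle, tok_rangle, tok_lfloor, tok_rfloor,
        tok_lvert, tok_rvert, tok_lceil, tok_rceil, tok_lbrace, tok_rbrace,
        startswith_cons, startswith_nil, he1', he2', he3', he4']
  by_cases hd2r : d2 = 'r'
  · subst hd2r
    rw [if_neg (by decide), if_neg (by decide)]
    cases rest2 with
    | nil =>
      simp only [List.length_nil] at hlen0
      rw [if_neg (show ¬((('r' : Char) = 'l' ∨ ('r' : Char) = 'r') ∧ i + 2 < (cs.length : Int))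
        from fun h => absurd h.2 (by omega))]
      simp [pyDelimScan, hslice0, tok_langle, tok_rangle, tok_lfloor, tok_rfloor,
        tok_lvert, tok_rvert, tok_lceil, tok_rceil, tok_lbrace, tok_rbrace,
        startswith_cons, startswith_nil_left]
    | cons e rest3 =>
    simp only [List.length_cons] at hlen0
    have hget2 : PySem.List.pyGet? cs (i + 2) = some e := by
      have := hgetk 2
      simp only [Nat.cast_ofNat, hd] at this
      simpa using this
    rw [if_pos (show (('r' : Char) = 'l' ∨ ('r' : Char) = 'r') ∧ i + 2 < (cs.length : Int)
      from ⟨Or.inr rfl, by omega⟩)]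
    simp only [hget2, hslice2]
    by_cases he1 : e = 'a'
    · subst he1
      rw [show altWords.get? 'a' = some ("angle", "⟨", "⟩") from by decide]
      by_cases hsw : PySem.Chars.startswith rest3 ['n', 'g', 'l', 'e'] = true
      all_goals
        simp [pyDelimScan, hslice0, tok_langle, tok_rangle, tok_lfloor, tok_rfloor,
          tok_lvert, tok_rvert, tok_lceil, tok_rceil, tok_lbrace, tok_rbrace, w_angle,
          startswith_cons, startswith_nil, len7b, wlen_angle, hsw]
      omega
    by_cases he2 : e = 'f'
    · subst he2
      rw [show altWords.get? 'f' = some ("floor", "⌊", "⌋") from by decide]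
      by_cases hsw : PySem.Chars.startswith rest3 ['l', 'o', 'o', 'r'] = true
      all_goals
        simp [pyDelimScan, hslice0, tok_langle, tok_rangle, tok_lfloor, tok_rfloor,
          tok_lvert, tok_rvert, tok_lceil, tok_rceil, tok_lbrace, tok_rbrace, w_floor,
          startswith_cons, startswith_nil, len7d, wlen_floor, hsw]
      omega
    by_cases he3 : e = 'v'
    · subst he3
      rw [show altWords.get? 'v' = some ("vert", "|", "|") from by decide]
      by_cases hsw : PySem.Chars.startswith rest3 ['e', 'r', 't'] = true
      all_goals
        simp [pyDelimScan, hslice0, tok_langle, tok_rangle, tok_lfloor, tok_rfloor,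
          tok_lvert, tok_rvert, tok_lceil, tok_rceil, tok_lbrace, tok_rbrace, w_vert,
          startswith_cons, startswith_nil, len6b, wlen_vert, hsw]
      omega
    by_cases he4 : e = 'c'
    · subst he4
      rw [show altWords.get? 'c' = some ("ceil", "⌈", "⌉") from by decide]
      by_cases hsw : PySem.Chars.startswith rest3 ['e', 'i', 'l'] = true
      all_goals
        simp [pyDelimScan, hslice0, tok_langle, tok_rangle, tok_lfloor, tok_rfloor,
          tok_lvert, tok_rvert, tok_lceil, tok_rceil, tok_lbrace, tok_rbrace, w_ceil,
          startswith_cons, startswith_nil, len6d, wlen_ceil, hsw]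
      omega
    · have hw : altWords.get? e = none := by
        rw [altWords_mk]
        apply dict_get?_char_none
        intro p hp
        simp only [List.mem_cons, List.not_mem_nil, or_false] at hp
        rcases hp with h | h | h | h <;> subst h <;>
          exact beq_eq_false_iff_ne.mpr (by intro hh; first
            | exact he1 hh.symm | exact he2 hh.symm | exact he3 hh.symm | exact he4 hh.symm)
      rw [hw]
      have he1' : ('a' = e) = False := eq_false (fun h => he1 h.symm)
      have he2' : ('f' = e) = False := eq_false (fun h => he2 h.symm)
      have he3' : ('v' = e) = False := eq_false (fun h => he3 h.symm)
      have he4' : ('c' = e) = False := eq_false (fun h => he4 h.symm)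
      simp [pyDelimScan, hslice0, tok_langle, tok_rangle, tok_lfloor, tok_rfloor,
        tok_lvert, tok_rvert, tok_lceil, tok_rceil, tok_lbrace, tok_rbrace,
        startswith_cons, startswith_nil, he1', he2', he3', he4']
  · -- d2 not one of '{', '}', 'l', 'r'
    rw [if_neg hd2a, if_neg hd2b,
      if_neg (show ¬((d2 = 'l' ∨ d2 = 'r') ∧ i + 2 < (cs.length : Int)) from
        fun h => h.1.elim hd2l hd2r)]
    have ha' : ('{' = d2) = False := eq_false (fun h => hd2a h.symm)
    have hb' : ('}' = d2) = False := eq_false (fun h => hd2b h.symm)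
    have hl' : ('l' = d2) = False := eq_false (fun h => hd2l h.symm)
    have hr' : ('r' = d2) = False := eq_false (fun h => hd2r h.symm)
    simp [pyDelimScan, hslice0, tok_langle, tok_rangle, tok_lfloor, tok_rfloor,
      tok_lvert, tok_rvert, tok_lceil, tok_rceil, tok_lbrace, tok_rbrace,
      startswith_cons, ha', hb', hl', hr',
      show PySem.Chars.isIn ['\\'] ['(', ')', '[', ']', '|'] = false from by decide]

-- ===== VERDICT (by name: the statement is the Claim_ definition above) =====
theorem consume_delimiter_py_spec : Claim_equal_consume_delimiter_py := by
  intro text start _hdom hpre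
  unfold Spec_consume_delimiter_py
  unfold consume_delimiter_py consume_delimiter_py_alt
  simp only
  have h0 : 0 ≤ py_skip_spaces text start :=
    pySkipSpacesGo_nonneg text.toList _ start hpre
  by_cases hge : ((text.toList.length : Int) ≤ py_skip_spaces text start)
  · rw [if_pos hge, if_pos hge]
  · rw [if_neg hge, if_neg hge]
    exact branch_eq text.toList (py_skip_spaces text start) h0 (by omega)
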